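-- pv_equiv track=rewrite | github.com/BOYOUNG-KANG/Algorithm | 프로그래머스/1/140108. 문자열 나누기/문자열 나누기.py | solution
-- ===== SOURCE A (Python) =====
-- def solution(s):
--     answer = 0
--
--     first_count = 0
--     other_count = 0
--
--     for i in range(len(s)):
--         if first_count == other_count:
--             answer += 1
--             k = s[i]
--         if k == s[i]:
--             first_count += 1
--         else:
--             other_count += 1
--
--     return answer
-- ===== SOURCE B (Python) =====
-- def solution(s):
--     answer = 0
--     i = 0
--     n = len(s)
--     while i < n:
--         answer += 1
--         k = s[i]
--         first = 0
--         other = 0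
--         while i < n:
--             if s[i] == k:
--                 first += 1
--             else:
--                 other += 1
--             i += 1
--             if first == other:
--                 break
--     return answer
-- ===== Notes on version B (the rewrite author's own statement) =====
-- stated objective: alternative
-- what changed: Replaced A's single pass with global cumulative counters by a two-level nested loop: the outer while counts one group per iteration, the inner while consumes characters with per-group counters reset to zero and breaks when they balance.
import Mathlib
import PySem

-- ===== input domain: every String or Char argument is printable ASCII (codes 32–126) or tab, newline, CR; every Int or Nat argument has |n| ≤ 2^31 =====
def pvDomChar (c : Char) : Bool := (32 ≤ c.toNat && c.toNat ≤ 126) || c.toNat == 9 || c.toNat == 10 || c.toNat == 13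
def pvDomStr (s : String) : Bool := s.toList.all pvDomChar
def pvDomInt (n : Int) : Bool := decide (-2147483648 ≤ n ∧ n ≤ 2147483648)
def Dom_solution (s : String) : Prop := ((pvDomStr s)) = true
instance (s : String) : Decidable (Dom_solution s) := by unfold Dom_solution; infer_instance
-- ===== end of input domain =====

-- B replaces A's single pass with cumulative global counters by an outer loop over
-- groups with per-group counters reset to zero (alternative decomposition, same cost).

-- ===== PORT A =====
-- one step of A's for-loop: state = (answer, first_count, other_count, k)
def stepA (st : Int × Int × Int × Char) (c : Char) : Int × Int × Int × Char :=
  let (ans, f, o, k) := st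
  let (ans, k) := if f = o then (ans + 1, c) else (ans, k)
  if k = c then (ans, f + 1, o, k) else (ans, f, o + 1, k)

-- Python's `k` is unassigned before the loop but is always set on the first
-- iteration (0 == 0); the initial ' ' is never read before being overwritten.
def solution (s : String) : Int :=
  (s.toList.foldl stepA (0, 0, 0, ' ')).1

-- ===== PORT B =====
-- inner while-loop of B: consume chars, incrementing f/o, until f = o; returns the rest
def consumeB (k : Char) (f o : Int) : List Char → List Char
  | [] => []
  | c :: rest =>
    if c = k then
      (if f + 1 = o then rest else consumeB k (f + 1) o rest)
    else
      (if f = o + 1 then rest else consumeB k f (o + 1) rest)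

theorem consumeB_length_le (k : Char) (f o : Int) (l : List Char) :
    (consumeB k f o l).length ≤ l.length := by
  induction l generalizing f o with
  | nil => simp [consumeB]
  | cons c rest ih =>
    simp only [consumeB]
    split
    · split
      · simp
      · exact le_trans (ih _ _) (Nat.le_succ _)
    · split
      · simp
      · exact le_trans (ih _ _) (Nat.le_succ _)

-- outer while-loop of B: one iteration per group
def groupsB : List Char → Int
  | [] => 0
  | c :: rest => 1 + groupsB (consumeB c 1 0 rest)
termination_by l => l.length
decreasing_by
  exact Nat.lt_succ_of_le (consumeB_length_le c 1 0 rest)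

def solution_alt (s : String) : Int := groupsB s.toList

-- ===== PRECONDITION & SPEC =====
def Spec_solution (s : String) (out : Int) : Prop := out = solution_alt s
instance (s : String) (out : Int) : Decidable (Spec_solution s out) := by unfold Spec_solution; infer_instance

-- ===== CLAIM (what is proved, stated in full; the proofs are below) =====
def Claim_equal_solution : Prop := ∀ (s : String), Dom_solution s → Spec_solution s (solution s)

-- ===== LEMMAS AND PROOFS =====

-- consumeB only depends on the difference of its two counters
theorem consumeB_shift (l : List Char) (k : Char) (f o f' o' : Int)
    (h : f - o = f' - o') : consumeB k f o l = consumeB k f' o' l := by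
  induction l generalizing f o f' o' with
  | nil => rfl
  | cons c rest ih =>
    simp only [consumeB]
    by_cases hc : c = k
    · rw [if_pos hc, if_pos hc]
      by_cases he : f + 1 = o
      · rw [if_pos he, if_pos (show f' + 1 = o' by omega)]
      · rw [if_neg he, if_neg (show ¬ f' + 1 = o' by omega), ih (f + 1) o (f' + 1) o' (by omega)]
    · rw [if_neg hc, if_neg hc]
      by_cases he : f = o + 1
      · rw [if_pos he, if_pos (show f' = o' + 1 by omega)]
      · rw [if_neg he, if_neg (show ¬ f' = o' + 1 by omega), ih f (o + 1) f' (o' + 1) (by omega)]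

-- main invariant: A's fold from any state equals the answer so far plus B's group
-- count of the remaining characters (of the current in-group remainder if f ≠ o)
theorem foldA_eq (l : List Char) (ans f o : Int) (k : Char) :
    (l.foldl stepA (ans, f, o, k)).1
      = ans + (if f = o then groupsB l else groupsB (consumeB k f o l)) := by
  induction l generalizing ans f o k with
  | nil => simp [consumeB, groupsB]
  | cons c rest ih =>
    by_cases hfo : f = o
    · subst hfo
      have hstep : stepA (ans, f, f, k) c = (ans + 1, f + 1, f, c) := by
        simp [stepA]
      rw [List.foldl_cons, hstep, ih, if_pos rfl,
        if_neg (show ¬ f + 1 = f by omega),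
        consumeB_shift rest c (f + 1) f 1 0 (by ring), groupsB]
      ring
    · have hstep : stepA (ans, f, o, k) c
          = if k = c then (ans, f + 1, o, k) else (ans, f, o + 1, k) := by
        simp [stepA, hfo]
      rw [if_neg hfo]
      by_cases hk : k = c
      · rw [List.foldl_cons, hstep, if_pos hk, ih,
          show consumeB k f o (c :: rest)
            = if f + 1 = o then rest else consumeB k (f + 1) o rest by
            rw [consumeB, if_pos hk.symm]]
        by_cases he : f + 1 = o
        · rw [if_pos he, if_pos he]
        · rw [if_neg he, if_neg he]
      · rw [List.foldl_cons, hstep, if_neg hk, ih,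
          show consumeB k f o (c :: rest)
            = if f = o + 1 then rest else consumeB k f (o + 1) rest by
            rw [consumeB, if_neg (fun h => hk h.symm)]]
        by_cases he : f = o + 1
        · rw [if_pos he, if_pos he]
        · rw [if_neg he, if_neg he]

-- ===== VERDICT (by name: the statement is the Claim_ definition above) =====
theorem solution_spec : Claim_equal_solution := by
  intro s _
  show solution s = solution_alt s
  unfold solution solution_alt
  rw [foldA_eq]
  simp
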